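-- pv_equiv track=rewrite | github.com/Mankindhufs/Mankind | backend/utils/extract.py | extract_table_fields
-- ===== SOURCE A (Python) =====
-- def extract_table_fields(text: str, labels: list[str]) -> dict[str,str]:
--     """
--     labels 리스트에 있는 각 라벨(label)부터
--     다음 라벨이 시작되기 전까지의 모든 텍스트를 한 덩어리로 잘라 반환
--     """
--     out: dict[str,str] = {}
--     for i, label in enumerate(labels):
--         idx = text.find(label)
--         if idx == -1:
--             out[label] = None
--             continue
--         start = idx + len(label)
--         end = len(text)
--         # 다음 라벨이 시작되는 지점까지 자르기
--         for next_label in labels[i+1:]: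
--             j = text.find(next_label, start)
--             if j != -1 and j < end:
--                 end = j
--         snippet = text[start:end].strip()
--         out[label] = snippet or None
--     return out
-- ===== SOURCE B (Python) =====
-- def _occurrences(text, lab):
--     """All occurrence positions of lab in text (overlapping included), ascending."""
--     res = []
--     pos = 0
--     while True:
--         j = text.find(lab, pos)
--         if j == -1:
--             break
--         res.append(j)
--         pos = j + 1
--     return res
--
--
-- def _first_at_or_after(a, x):
--     """First element of the sorted list a that is >= x, or None (hand-written bisect_left)."""
--     lo, hi = 0, len(a)
--     while lo < hi:
--         mid = (lo + hi) // 2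
--         if a[mid] < x:
--             lo = mid + 1
--         else:
--             hi = mid
--     return a[lo] if lo < len(a) else None
--
--
-- def extract_table_fields(text: str, labels: list[str]) -> dict:
--     n = len(text)
--     # index the text once per distinct label
--     occ = {}
--     for lab in labels:
--         if lab not in occ:
--             occ[lab] = _occurrences(text, lab)
--     out = {}
--     for i, label in enumerate(labels):
--         ps = occ[label]
--         if not ps:
--             out[label] = None
--         else:
--             start = ps[0] + len(label)
--             end = n
--             for nl in labels[i + 1:]:
--                 k = _first_at_or_after(occ[nl], start)
--                 if k is not None and k < end:
--                     end = k
--             snippet = text[start:end].strip()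
--             out[label] = snippet or None
--     return out
-- ===== Notes on version B (the rewrite author's own statement) =====
-- stated objective: faster
-- what changed: Instead of re-scanning the text with find(next_label, start) for every (label, later-label) pair, B indexes the text once per distinct label into a sorted list of all occurrence positions and answers each 'first occurrence at or after start' query by a hand-written binary search.
import Mathlib
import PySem

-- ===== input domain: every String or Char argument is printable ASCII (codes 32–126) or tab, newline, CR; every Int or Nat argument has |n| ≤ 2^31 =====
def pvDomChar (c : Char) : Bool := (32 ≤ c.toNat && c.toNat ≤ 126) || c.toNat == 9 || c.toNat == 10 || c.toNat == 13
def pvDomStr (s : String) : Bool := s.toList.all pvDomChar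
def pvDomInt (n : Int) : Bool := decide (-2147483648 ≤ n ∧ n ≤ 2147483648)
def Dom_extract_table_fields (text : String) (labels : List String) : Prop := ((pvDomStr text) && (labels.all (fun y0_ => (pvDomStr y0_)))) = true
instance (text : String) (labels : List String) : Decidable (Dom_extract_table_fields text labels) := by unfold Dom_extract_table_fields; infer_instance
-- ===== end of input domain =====

-- B replaces A's repeated text.find rescans by one precomputed occurrence list per distinct label plus binary search (objective: faster; return-value equivalence, neither program mutates its arguments).

-- ===== PORT A =====
-- inner loop of A: for next_label in labels[i+1:]: j = text.find(next_label, start); if j != -1 and j < end: end = j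
def aEnd (t : List Char) (rest : List String) (start : Int) (e : Int) : Int :=
  match rest with
  | [] => e
  | nl :: rest' =>
      let j := PySem.Chars.findFrom t nl.toList start none
      aEnd t rest' start (if j ≠ -1 ∧ j < e then j else e)

-- outer loop of A: for i, label in enumerate(labels)  (rest is labels[i+1:])
def aLoop (t : List Char) (rest : List String) (out : PySem.Dict String (Option String)) : PySem.Dict String (Option String) :=
  match rest with
  | [] => out
  | label :: rest' =>
      let idx := PySem.Chars.find t label.toList
      if idx = -1 then aLoop t rest' (out.insert label none)
      else
        let start := idx + (label.toList.length : Int)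
        let e := aEnd t rest' start (t.length : Int)
        let snippet := PySem.Chars.strip (PySem.Chars.slice t (some start) (some e))
        aLoop t rest' (out.insert label (if snippet = [] then none else some (String.ofList snippet)))

def extract_table_fields (text : String) (labels : List String) : List (String × Option String) :=
  (aLoop text.toList labels PySem.Dict.empty).items

-- ===== PORT B =====
-- bound on text.find(lab, pos), cited by occsFrom's decreasing_by
theorem occs_step_bound (t lab : List Char) (pos : Nat)
    (h : PySem.Chars.findFrom t lab (pos : Int) none ≠ -1) :
    pos ≤ (PySem.Chars.findFrom t lab (pos : Int) none).toNat ∧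
    (PySem.Chars.findFrom t lab (pos : Int) none).toNat ≤ t.length := by
  by_cases hp : pos ≤ t.length
  · rw [PySem.Chars.findFrom_natCast t lab pos hp] at h ⊢
    set f := PySem.Chars.find (t.drop pos) lab with hf
    have h0 : -1 ≤ f := PySem.Chars.neg_one_le_find _ _
    have h1 : f ≤ (t.drop pos).length := PySem.Chars.find_le_length _ _
    simp only [List.length_drop] at h1
    by_cases hz : f = -1
    · simp [hz] at h
    · simp only [if_neg hz] at h ⊢
      omega
  · exfalso
    apply h
    simp only [PySem.Chars.findFrom]
    have : (t.length : Int) < (pos : Int) := by omega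
    split_ifs with h1 <;> omega

-- _occurrences: pos = 0; while True: j = text.find(lab, pos); if j == -1: break; res.append(j); pos = j + 1
def occsFrom (t lab : List Char) (pos : Nat) : List Int :=
  let j := PySem.Chars.findFrom t lab (pos : Int) none
  if h : j = -1 then []
  else j :: occsFrom t lab (j.toNat + 1)
termination_by t.length + 1 - pos
decreasing_by
  have hb := occs_step_bound t lab pos h
  omega

def occsOf (t lab : List Char) : List Int := occsFrom t lab 0

-- _first_at_or_after: the hand-written bisect_left while-loop, then a[lo] if lo < len(a) else None
def bisectLoop (a : List Int) (x : Int) (lo hi : Nat) : Nat :=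
  if lo < hi then
    let mid := (lo + hi) / 2
    if a.getD mid 0 < x then bisectLoop a x (mid + 1) hi else bisectLoop a x lo mid
  else lo
termination_by hi - lo
decreasing_by all_goals omega

def firstAtOrAfter (a : List Int) (x : Int) : Option Int :=
  let lo := bisectLoop a x 0 a.length
  if lo < a.length then some (a.getD lo 0) else none

-- first loop of B: for lab in labels: if lab not in occ: occ[lab] = _occurrences(text, lab)
def buildOcc (t : List Char) (labs : List String) (d : PySem.Dict String (List Int)) : PySem.Dict String (List Int) :=
  labs.foldl (fun d lab => if d.contains lab then d else d.insert lab (occsOf t lab.toList)) d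

-- inner loop of B: k = _first_at_or_after(occ[nl], start); if k is not None and k < end: end = k
-- (occ[nl] / occ[label]: the key is always present — inserted by the first loop — so getD's default is never used)
def bEnd (occd : PySem.Dict String (List Int)) (rest : List String) (start : Int) (e : Int) : Int :=
  match rest with
  | [] => e
  | nl :: rest' =>
      let k := firstAtOrAfter (occd.getD nl []) start
      bEnd occd rest' start (match k with | some k' => if k' < e then k' else e | none => e)

-- main loop of B: for i, label in enumerate(labels)
def bLoop (t : List Char) (occd : PySem.Dict String (List Int)) (rest : List String)
    (out : PySem.Dict String (Option String)) : PySem.Dict String (Option String) :=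
  match rest with
  | [] => out
  | label :: rest' =>
      match occd.getD label [] with
      | [] => bLoop t occd rest' (out.insert label none)
      | p :: _ =>
          let start := p + (label.toList.length : Int)
          let e := bEnd occd rest' start (t.length : Int)
          let snippet := PySem.Chars.strip (PySem.Chars.slice t (some start) (some e))
          bLoop t occd rest' (out.insert label (if snippet = [] then none else some (String.ofList snippet)))

def extract_table_fields_alt (text : String) (labels : List String) : List (String × Option String) :=
  let t := text.toList
  let occd := buildOcc t labels PySem.Dict.empty
  (bLoop t occd labels PySem.Dict.empty).items

-- ===== PRECONDITION & SPEC =====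
def Spec_extract_table_fields (text : String) (labels : List String) (out : List (String × Option String)) : Prop := out = extract_table_fields_alt text labels
instance (text : String) (labels : List String) (out : List (String × Option String)) : Decidable (Spec_extract_table_fields text labels out) := by unfold Spec_extract_table_fields; infer_instance

-- ===== CLAIM (what is proved, stated in full; the proofs are below) =====
def Claim_equal_extract_table_fields : Prop := ∀ (text : String) (labels : List String), Dom_extract_table_fields text labels → Spec_extract_table_fields text labels (extract_table_fields text labels)

-- ===== LEMMAS AND PROOFS =====

theorem mem_occsFrom (t lab : List Char) (pos : Nat) (y : Int) :
    y ∈ occsFrom t lab pos ↔ ∃ j : Nat, pos ≤ j ∧ j ≤ t.length ∧ lab <+: t.drop j ∧ y = (j : Int) := by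
  have main : ∀ n pos, t.length + 1 - pos ≤ n → ∀ y : Int,
      (y ∈ occsFrom t lab pos ↔ ∃ j : Nat, pos ≤ j ∧ j ≤ t.length ∧ lab <+: t.drop j ∧ y = (j : Int)) := by
    intro n
    induction n with
    | zero =>
      intro pos hn y
      -- pos > t.length here
      have hp : t.length < pos := by omega
      rw [occsFrom]
      have hj : PySem.Chars.findFrom t lab (pos : Int) none = -1 := by
        simp only [PySem.Chars.findFrom]
        have : (t.length : Int) < (pos : Int) := by omega
        split_ifs with h1 <;> omega
      simp only [hj, dif_pos]
      simp only [List.not_mem_nil, false_iff]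
      rintro ⟨j, h1, h2, h3, h4⟩
      omega
    | succ n ih =>
      intro pos hn y
      rw [occsFrom]
      by_cases hj : PySem.Chars.findFrom t lab (pos : Int) none = -1
      · simp only [hj, dif_pos, List.not_mem_nil, false_iff]
        rintro ⟨j, h1, h2, h3, h4⟩
        -- derive lab <:+: t.drop pos hence findFrom ≠ -1
        by_cases hp : pos ≤ t.length
        · have hinf : lab <:+: t.drop pos := by
            have hdd : t.drop j = (t.drop pos).drop (j - pos) := by
              rw [List.drop_drop]; congr 1; omega
            rw [hdd] at h3
            exact h3.isInfix.trans (List.drop_suffix _ _).isInfix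
          rw [PySem.Chars.findFrom_natCast_eq_neg_one_iff t lab pos hp] at hj
          exact hj hinf
        · omega
      · have hb := occs_step_bound t lab pos hj
        have hp : pos ≤ t.length := by omega
        have spec := PySem.Chars.findFrom_natCast_spec t lab pos hp hj
        set f := PySem.Chars.findFrom t lab (pos : Int) none with hf
        have hf0 : (0:Int) ≤ f := le_trans (by exact_mod_cast Nat.zero_le pos) spec.1
        have hfto : ((f.toNat : Nat) : Int) = f := Int.toNat_of_nonneg hf0
        simp only [dif_neg hj, List.mem_cons]
        rw [ih (f.toNat + 1) (by omega) y]
        constructor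
        · rintro (rfl | ⟨j, h1, h2, h3, h4⟩)
          · exact ⟨f.toNat, hb.1, hb.2, spec.2.1, hfto.symm⟩
          · exact ⟨j, by omega, h2, h3, h4⟩
        · rintro ⟨j, h1, h2, h3, h4⟩
          rcases lt_trichotomy j f.toNat with hlt | heq | hgt
          · exact absurd h3 (spec.2.2 j h1 hlt)
          · subst heq; left; rw [h4, hfto]
          · right; exact ⟨j, by omega, h2, h3, h4⟩
  exact main (t.length + 1 - pos) pos le_rfl y

theorem occsFrom_pairwise (t lab : List Char) (pos : Nat) :
    (occsFrom t lab pos).Pairwise (· < ·) := by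
  have main : ∀ n pos, t.length + 1 - pos ≤ n → (occsFrom t lab pos).Pairwise (· < ·) := by
    intro n
    induction n with
    | zero =>
      intro pos hn
      rw [occsFrom]
      have hj : PySem.Chars.findFrom t lab (pos : Int) none = -1 := by
        simp only [PySem.Chars.findFrom]
        have : (t.length : Int) < (pos : Int) := by omega
        split_ifs with h1 <;> omega
      simp [hj]
    | succ n ih =>
      intro pos hn
      rw [occsFrom]
      by_cases hj : PySem.Chars.findFrom t lab (pos : Int) none = -1
      · simp [hj]
      · have hb := occs_step_bound t lab pos hj
        simp only [dif_neg hj, List.pairwise_cons]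
        refine ⟨?_, ih _ (by omega)⟩
        intro y hy
        rw [mem_occsFrom] at hy
        obtain ⟨j, h1, h2, h3, rfl⟩ := hy
        have hf0 : (0:Int) ≤ PySem.Chars.findFrom t lab (pos : Int) none := by
          exact_mod_cast le_trans (by exact_mod_cast Nat.zero_le pos)
            (PySem.Chars.findFrom_natCast_spec t lab pos (by omega) hj).1
        omega
  exact main (t.length + 1 - pos) pos le_rfl

theorem bisectLoop_spec (a : List Int) (x : Int) (lo hi : Nat)
    (hs : a.Pairwise (· ≤ ·)) (hhi : hi ≤ a.length) (hle : lo ≤ hi)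
    (h1 : ∀ j, j < lo → a.getD j 0 < x)
    (h2 : ∀ j, hi ≤ j → j < a.length → x ≤ a.getD j 0) :
    bisectLoop a x lo hi ≤ a.length ∧
    (∀ j, j < bisectLoop a x lo hi → a.getD j 0 < x) ∧
    (∀ j, bisectLoop a x lo hi ≤ j → j < a.length → x ≤ a.getD j 0) := by
  have mono : ∀ p q : Nat, p ≤ q → q < a.length → a.getD p 0 ≤ a.getD q 0 := by
    intro p q hpq hq
    rcases eq_or_lt_of_le hpq with rfl | hlt
    · exact le_rfl
    · rw [List.getD_eq_getElem a 0 (by omega), List.getD_eq_getElem a 0 hq]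
      exact List.pairwise_iff_getElem.mp hs p q (by omega) hq hlt
  have main : ∀ n lo hi, hi - lo ≤ n → hi ≤ a.length → lo ≤ hi →
      (∀ j, j < lo → a.getD j 0 < x) →
      (∀ j, hi ≤ j → j < a.length → x ≤ a.getD j 0) →
      bisectLoop a x lo hi ≤ a.length ∧
      (∀ j, j < bisectLoop a x lo hi → a.getD j 0 < x) ∧
      (∀ j, bisectLoop a x lo hi ≤ j → j < a.length → x ≤ a.getD j 0) := by
    intro n
    induction n with
    | zero =>
      intro lo hi hn hhi hle h1 h2
      have : lo = hi := by omega
      subst this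
      rw [bisectLoop]
      simp only [lt_irrefl, if_false]
      exact ⟨hhi, h1, h2⟩
    | succ n ih =>
      intro lo hi hn hhi hle h1 h2
      rw [bisectLoop]
      by_cases hlh : lo < hi
      · simp only [if_pos hlh]
        by_cases hm : a.getD ((lo + hi) / 2) 0 < x
        · simp only [if_pos hm]
          refine ih ((lo + hi) / 2 + 1) hi (by omega) hhi (by omega) ?_ h2
          intro j hj
          rcases Nat.lt_or_ge j lo with h | h
          · exact h1 j h
          · exact lt_of_le_of_lt (mono j ((lo + hi) / 2) (by omega) (by omega)) hm
        · simp only [if_neg hm]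
          refine ih lo ((lo + hi) / 2) (by omega) (by omega) (by omega) h1 ?_
          intro j hj hjl
          exact le_trans (not_lt.mp hm) (mono ((lo + hi) / 2) j hj hjl)
      · have : lo = hi := by omega
        subst this
        simp only [if_neg hlh]
        exact ⟨hhi, h1, h2⟩
  exact main (hi - lo) lo hi le_rfl hhi hle h1 h2

theorem firstAtOrAfter_eq (t lab : List Char) (start : Nat) (hs : start ≤ t.length) :
    firstAtOrAfter (occsOf t lab) (start : Int) =
      (if PySem.Chars.findFrom t lab (start : Int) none = -1 then none
       else some (PySem.Chars.findFrom t lab (start : Int) none)) := by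
  set a := occsOf t lab with ha
  have hmem : ∀ y : Int, y ∈ a ↔ ∃ j : Nat, j ≤ t.length ∧ lab <+: t.drop j ∧ y = (j : Int) := by
    intro y
    rw [ha, occsOf, mem_occsFrom]
    constructor
    · rintro ⟨j, _, h2, h3, h4⟩; exact ⟨j, h2, h3, h4⟩
    · rintro ⟨j, h2, h3, h4⟩; exact ⟨j, Nat.zero_le j, h2, h3, h4⟩
  have hsorted : a.Pairwise (· ≤ ·) :=
    (occsFrom_pairwise t lab 0).imp (fun h => le_of_lt h)
  have hspec := bisectLoop_spec a (start : Int) 0 a.length hsorted le_rfl (Nat.zero_le _)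
    (fun j hj => absurd hj (Nat.not_lt_zero j)) (fun j hj hjl => absurd hjl (by omega))
  set r := bisectLoop a (start : Int) 0 a.length with hr
  have mono : ∀ p q : Nat, p ≤ q → q < a.length → a.getD p 0 ≤ a.getD q 0 := by
    intro p q hpq hq
    rcases eq_or_lt_of_le hpq with rfl | hlt
    · exact le_rfl
    · rw [List.getD_eq_getElem a 0 (by omega), List.getD_eq_getElem a 0 hq]
      exact List.pairwise_iff_getElem.mp hsorted p q (by omega) hq hlt
  rw [firstAtOrAfter]
  by_cases hrl : r < a.length
  · simp only [← hr, if_pos hrl]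
    -- the found element
    have hymem : a.getD r 0 ∈ a := by
      rw [List.getD_eq_getElem a 0 hrl]; exact List.getElem_mem hrl
    obtain ⟨j0, hj0len, hj0pre, hj0eq⟩ := (hmem _).mp hymem
    have hystart : (start : Int) ≤ a.getD r 0 := hspec.2.2 r le_rfl hrl
    -- findFrom is not -1
    have hinf : lab <:+: t.drop start := by
      have hdd : t.drop j0 = (t.drop start).drop (j0 - start) := by
        rw [List.drop_drop]; congr 1; omega
      rw [hdd] at hj0pre
      exact hj0pre.isInfix.trans (List.drop_suffix _ _).isInfix
    have hne : PySem.Chars.findFrom t lab (start : Int) none ≠ -1 := by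
      rw [ne_eq, PySem.Chars.findFrom_natCast_eq_neg_one_iff t lab start hs]
      simpa using hinf
    have hb := occs_step_bound t lab start hne
    have spec' := PySem.Chars.findFrom_natCast_spec t lab start hs hne
    set f := PySem.Chars.findFrom t lab (start : Int) none with hf
    have hf0 : (0:Int) ≤ f := le_trans (by exact_mod_cast Nat.zero_le start) spec'.1
    have hfto : ((f.toNat : Nat) : Int) = f := Int.toNat_of_nonneg hf0
    rw [if_neg hne]
    congr 1
    -- f ≤ a.getD r 0 : minimality of f among occurrences ≥ start
    have hfley : f ≤ a.getD r 0 := by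
      rcases Nat.lt_or_ge j0 f.toNat with hlt | hge
      · exact absurd hj0pre (spec'.2.2 j0 (by omega) hlt)
      · omega
    -- a.getD r 0 ≤ f : f is a member ≥ start, so its index is ≥ r
    have hfmem : f ∈ a := (hmem f).mpr ⟨f.toNat, hb.2, spec'.2.1, hfto.symm⟩
    obtain ⟨i, hi, hieq⟩ := List.mem_iff_getElem.mp hfmem
    have hir : r ≤ i := by
      by_contra hcon
      have := hspec.2.1 i (by omega)
      rw [List.getD_eq_getElem a 0 hi, hieq] at this
      omega
    have hylef : a.getD r 0 ≤ f := by
      have := mono r i hir hi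
      rw [List.getD_eq_getElem a 0 hi, hieq] at this
      exact this
    omega
  · simp only [← hr, if_neg hrl]
    -- no occurrence ≥ start: findFrom must be -1
    by_cases hne : PySem.Chars.findFrom t lab (start : Int) none = -1
    · rw [if_pos hne]
    · exfalso
      have hb := occs_step_bound t lab start hne
      have spec' := PySem.Chars.findFrom_natCast_spec t lab start hs hne
      set f := PySem.Chars.findFrom t lab (start : Int) none with hf
      have hf0 : (0:Int) ≤ f := le_trans (by exact_mod_cast Nat.zero_le start) spec'.1
      have hfto : ((f.toNat : Nat) : Int) = f := Int.toNat_of_nonneg hf0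
      have hfmem : f ∈ a := (hmem f).mpr ⟨f.toNat, hb.2, spec'.2.1, hfto.symm⟩
      obtain ⟨i, hi, hieq⟩ := List.mem_iff_getElem.mp hfmem
      have := hspec.2.1 i (by omega)
      rw [List.getD_eq_getElem a 0 hi, hieq] at this
      have : (start : Int) ≤ f := spec'.1
      omega

theorem occsOf_head (t lab : List Char) :
    (occsOf t lab = [] ↔ PySem.Chars.find t lab = -1) ∧
    (∀ p ps, occsOf t lab = p :: ps → PySem.Chars.find t lab = p) := by
  have h0 := firstAtOrAfter_eq t lab 0 (Nat.zero_le _)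
  simp only [Nat.cast_zero, PySem.Chars.findFrom_zero] at h0
  have hnn : ∀ y : Int, y ∈ occsOf t lab → 0 ≤ y := by
    intro y hy
    rw [occsOf, mem_occsFrom] at hy
    obtain ⟨j, _, _, _, rfl⟩ := hy
    exact_mod_cast Nat.zero_le j
  rcases hcase : occsOf t lab with _ | ⟨p, ps⟩
  · rw [hcase] at h0
    rw [firstAtOrAfter] at h0
    simp only [List.length_nil, Nat.not_lt_zero, if_false] at h0
    refine ⟨⟨fun _ => ?_, fun _ => rfl⟩, fun p ps hpp => absurd hpp (by simp)⟩
    by_contra hne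
    rw [if_neg hne] at h0
    simp at h0
  · -- the bisect at 0 lands on index 0
    have hsorted : (occsOf t lab).Pairwise (· ≤ ·) :=
      (occsFrom_pairwise t lab 0).imp (fun h => le_of_lt h)
    have hspec := bisectLoop_spec (occsOf t lab) 0 0 (occsOf t lab).length hsorted le_rfl
      (Nat.zero_le _) (fun j hj => absurd hj (Nat.not_lt_zero j)) (fun j hj hjl => absurd hjl (by omega))
    have hr0 : bisectLoop (occsOf t lab) 0 0 (occsOf t lab).length = 0 := by
      by_contra hne
      have h01 := hspec.2.1 0 (by omega)
      have : (occsOf t lab).getD 0 0 ∈ occsOf t lab := by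
        rw [List.getD_eq_getElem _ 0 (by rw [hcase]; simp)]
        exact List.getElem_mem _
      exact absurd (hnn _ this) (by omega)
    rw [firstAtOrAfter, hr0] at h0
    have hlen : 0 < (occsOf t lab).length := by rw [hcase]; simp
    rw [if_pos hlen] at h0
    have hget : (occsOf t lab).getD 0 0 = p := by rw [hcase]; rfl
    rw [hget] at h0
    have hfind : PySem.Chars.find t lab = p := by
      by_cases hne : PySem.Chars.find t lab = -1
      · rw [if_pos hne] at h0; simp at h0
      · rw [if_neg hne] at h0
        injection h0 with h0
        omega
    have hp0 : 0 ≤ p := hnn p (by rw [hcase]; exact List.mem_cons_self)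
    refine ⟨⟨fun h => absurd h (by simp), fun hf => ?_⟩, fun p' ps' hpp => ?_⟩
    · exfalso; omega
    · obtain ⟨rfl, rfl⟩ : p = p' ∧ ps = ps' := by
        injection hpp with h1 h2; exact ⟨h1, h2⟩
      exact hfind

theorem buildOcc_cons (t : List Char) (l : String) (ls : List String) (d : PySem.Dict String (List Int)) :
    buildOcc t (l :: ls) d = buildOcc t ls (if d.contains l then d else d.insert l (occsOf t l.toList)) := by
  rfl

theorem buildOcc_contains_mono (t : List Char) (labs : List String) (d : PySem.Dict String (List Int))
    (k : String) (h : d.contains k = true) : (buildOcc t labs d).contains k = true := by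
  induction labs generalizing d with
  | nil => exact h
  | cons l ls ih =>
    rw [buildOcc_cons]
    apply ih
    by_cases hc : d.contains l
    · rw [if_pos hc]; exact h
    · rw [if_neg hc, PySem.Dict.contains_insert]
      rw [h]; simp

theorem buildOcc_gen (t : List Char) (labs : List String) (d : PySem.Dict String (List Int))
    (hinv : ∀ k, d.contains k = true → d.getD k [] = occsOf t k.toList) :
    (∀ k, (buildOcc t labs d).contains k = true → (buildOcc t labs d).getD k [] = occsOf t k.toList) ∧
    (∀ k, k ∈ labs → (buildOcc t labs d).contains k = true) := by
  induction labs generalizing d with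
  | nil => exact ⟨hinv, fun k hk => absurd hk (List.not_mem_nil)⟩
  | cons l ls ih =>
    rw [buildOcc_cons]
    have hinv' : ∀ k, (if d.contains l then d else d.insert l (occsOf t l.toList)).contains k = true →
        (if d.contains l then d else d.insert l (occsOf t l.toList)).getD k [] = occsOf t k.toList := by
      intro k hk
      by_cases hc : d.contains l
      · rw [if_pos hc] at hk ⊢; exact hinv k hk
      · rw [if_neg hc] at hk ⊢
        rw [PySem.Dict.getD_insert]
        by_cases hkl : k = l
        · rw [if_pos hkl, hkl]
        · rw [if_neg hkl]
          apply hinv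
          rw [PySem.Dict.contains_insert] at hk
          simpa [hkl] using hk
    refine ⟨(ih _ hinv').1, ?_⟩
    intro k hk
    rcases List.mem_cons.mp hk with rfl | hk'
    · apply buildOcc_contains_mono
      by_cases hc : d.contains k
      · rw [if_pos hc]; exact hc
      · rw [if_neg hc, PySem.Dict.contains_insert]; simp
    · exact (ih _ hinv').2 k hk'

theorem buildOcc_getD (t : List Char) (labs : List String) (lab : String) (hmem : lab ∈ labs) :
    (buildOcc t labs PySem.Dict.empty).getD lab [] = occsOf t lab.toList := by
  have h := buildOcc_gen t labs PySem.Dict.empty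
    (fun k hk => absurd hk (by simp [PySem.Dict.contains_empty]))
  exact h.1 lab (h.2 lab hmem)

theorem aEnd_eq_bEnd (t : List Char) (occd : PySem.Dict String (List Int)) (rest : List String)
    (start : Nat) (hs : start ≤ t.length) (e : Int)
    (hocc : ∀ l ∈ rest, occd.getD l [] = occsOf t l.toList) :
    aEnd t rest (start : Int) e = bEnd occd rest (start : Int) e := by
  induction rest generalizing e with
  | nil => rfl
  | cons nl rest' ih =>
    rw [aEnd, bEnd]
    rw [hocc nl List.mem_cons_self, firstAtOrAfter_eq t nl.toList start hs]
    have heq :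
        (if PySem.Chars.findFrom t nl.toList (start : Int) none ≠ -1 ∧
            PySem.Chars.findFrom t nl.toList (start : Int) none < e
         then PySem.Chars.findFrom t nl.toList (start : Int) none else e) =
        (match (if PySem.Chars.findFrom t nl.toList (start : Int) none = -1 then none
                else some (PySem.Chars.findFrom t nl.toList (start : Int) none)) with
         | some k' => if k' < e then k' else e
         | none => e) := by
      by_cases hj : PySem.Chars.findFrom t nl.toList (start : Int) none = -1
      · simp [hj]
      · simp only [if_neg hj]
        by_cases hlt : PySem.Chars.findFrom t nl.toList (start : Int) none < e
        · simp [hj, hlt]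
        · simp [hj, hlt]
    rw [heq]
    exact ih _ (fun l hl => hocc l (List.mem_cons_of_mem _ hl))

theorem aLoop_eq_bLoop (t : List Char) (occd : PySem.Dict String (List Int)) (rest : List String)
    (out : PySem.Dict String (Option String))
    (hocc : ∀ l ∈ rest, occd.getD l [] = occsOf t l.toList) :
    aLoop t rest out = bLoop t occd rest out := by
  induction rest generalizing out with
  | nil => rfl
  | cons label rest' ih =>
    have hocc' : ∀ l ∈ rest', occd.getD l [] = occsOf t l.toList :=
      fun l hl => hocc l (List.mem_cons_of_mem _ hl)
    rw [aLoop, bLoop, hocc label List.mem_cons_self]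
    rcases hcase : occsOf t label.toList with _ | ⟨p, ps⟩
    · -- label not found
      have hfind : PySem.Chars.find t label.toList = -1 := (occsOf_head t label.toList).1.mp hcase
      simp only [hfind]
      exact ih _ hocc'
    · have hfind : PySem.Chars.find t label.toList = p := (occsOf_head t label.toList).2 p ps hcase
      have hpmem : p ∈ occsOf t label.toList := by rw [hcase]; exact List.mem_cons_self
      rw [occsOf, mem_occsFrom] at hpmem
      obtain ⟨j, -, hjlen, hjpre, rfl⟩ := hpmem
      have hne : (j : Int) ≠ -1 := by omega
      have hstart : (j : Int) + (label.toList.length : Int) = ((j + label.toList.length : Nat) : Int) := by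
        push_cast; ring
      have hslen : j + label.toList.length ≤ t.length := by
        have := hjpre.length_le
        simp only [List.length_drop] at this
        omega
      simp only [hfind, if_neg hne]
      rw [hstart, aEnd_eq_bEnd t occd rest' (j + label.toList.length) hslen (t.length : Int) hocc']
      exact ih _ hocc'

-- ===== VERDICT (by name: the statement is the Claim_ definition above) =====
theorem extract_table_fields_spec : Claim_equal_extract_table_fields := by
  intro text labels _
  unfold Spec_extract_table_fields extract_table_fields extract_table_fields_alt
  rw [aLoop_eq_bLoop text.toList (buildOcc text.toList labels PySem.Dict.empty) labels
    PySem.Dict.empty (fun l hl => buildOcc_getD text.toList labels l hl)]
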